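-- pv_equiv track=rewrite | github.com/choiwd/advent-of-code-2025 | day7/main.py | irradiate
-- ===== SOURCE A (Python) =====
-- from typing import List, Tuple
--
-- def irradiate(current_frame: List[int], counter : int, env: str) -> Tuple[List[int], int]:
--     result = [0 for _ in current_frame]
--     is_valid = lambda pos : pos >= 0 and pos < len(current_frame)
--     for (index, c) in enumerate(env):
--         n_rays = current_frame[index]
--         if n_rays: # has laser
--             if c == '^':
--                 if is_valid(index - 1):
--                     result[index - 1] += n_rays
--                 if is_valid(index + 1):
--                     result[index + 1] += n_rays
--                 counter += 1
--             if c == '.':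
--                 result[index] += n_rays
--     return (result, counter)
-- ===== SOURCE B (Python) =====
-- def irradiate(current_frame, counter, env):
--     # Gather/pull pass: each output cell pulls rays from its neighbours instead of
--     # the original's scatter loop.  (Requires len(env) <= len(current_frame); the
--     # original raises IndexError otherwise.)
--     n = len(current_frame)
--     m = len(env)
--
--     def peak(j):
--         return 0 <= j < m and j < n and env[j] == '^' and current_frame[j] != 0
--
--     def pull(i):
--         v = 0
--         if peak(i - 1):
--             v += current_frame[i - 1]
--         if peak(i + 1):
--             v += current_frame[i + 1]
--         if i < m and env[i] == '.' and current_frame[i] != 0: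
--             v += current_frame[i]
--         return v
--
--     result = [pull(i) for i in range(n)]
--     counter += sum(1 for j in range(n) if peak(j))
--     return (result, counter)
-- ===== Notes on version B (the rewrite author's own statement) =====
-- stated objective: alternative
-- what changed: Replaces A's scatter loop (each '^' cell pushes its rays into neighbouring result slots via in-place += and mutable counter) by a gather/pull pass that computes each output cell directly from its neighbours plus a one-shot count of active peaks.
import Mathlib
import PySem

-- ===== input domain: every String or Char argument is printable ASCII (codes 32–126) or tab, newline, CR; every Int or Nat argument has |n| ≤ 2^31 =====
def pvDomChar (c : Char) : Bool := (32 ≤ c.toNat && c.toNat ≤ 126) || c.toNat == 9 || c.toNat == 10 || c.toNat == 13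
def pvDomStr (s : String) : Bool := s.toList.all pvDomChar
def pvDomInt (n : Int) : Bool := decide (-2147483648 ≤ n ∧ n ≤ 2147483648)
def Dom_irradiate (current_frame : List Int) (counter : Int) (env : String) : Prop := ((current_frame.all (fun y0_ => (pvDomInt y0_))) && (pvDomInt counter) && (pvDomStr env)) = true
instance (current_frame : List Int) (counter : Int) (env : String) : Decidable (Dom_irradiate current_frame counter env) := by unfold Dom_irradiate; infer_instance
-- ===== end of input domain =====

-- B replaces A's scatter loop by a gather/pull pass (alternative decomposition, same cost);
-- equivalence is claimed on inputs where A does not raise (len(env) ≤ len(current_frame)).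

-- ===== PORT A =====
-- result[i] += v (only ever reached with 0 ≤ i < length, as guarded by is_valid)
def pvBump (xs : List Int) (i : Int) (v : Int) : List Int :=
  xs.set i.toNat (xs.getD i.toNat 0 + v)

-- one iteration of A's `for (index, c) in enumerate(env)` body
def pvStepA (cf : List Int) (st : List Int × Int) (p : Int × Char) : List Int × Int :=
  let n : Int := cf.length
  let index := p.1
  let c := p.2
  -- current_frame[index]: pyGet? is none exactly where Python raises IndexError (excluded by Pre_)
  let n_rays := (PySem.List.pyGet? cf index).getD 0
  if n_rays ≠ 0 then
    let rc :=
      if c = '^' then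
        let r1 := if 0 ≤ index - 1 ∧ index - 1 < n then pvBump st.1 (index - 1) n_rays else st.1
        let r2 := if 0 ≤ index + 1 ∧ index + 1 < n then pvBump r1 (index + 1) n_rays else r1
        (r2, st.2 + 1)
      else (st.1, st.2)
    if c = '.' then (pvBump rc.1 index n_rays, rc.2) else rc
  else st

def irradiate (current_frame : List Int) (counter : Int) (env : String) : List Int × Int :=
  (PySem.List.enumerate env.toList 0).foldl (pvStepA current_frame)
    (current_frame.map (fun _ => 0), counter)

-- ===== PORT B =====
-- peak(j) of Source B: position j holds a '^' with rays
def pvPeak (cf : List Int) (cs : List Char) (j : Int) : Bool :=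
  decide (0 ≤ j ∧ j < (cs.length : Int) ∧ j < (cf.length : Int)
    ∧ cs.getD j.toNat ' ' = '^' ∧ cf.getD j.toNat 0 ≠ 0)

-- pull(i) of Source B: the value cell i gathers from its neighbours and itself
def pvPull (cf : List Int) (cs : List Char) (i : Nat) : Int :=
  (if pvPeak cf cs ((i : Int) - 1) then cf.getD (i - 1) 0 else 0)
  + (if pvPeak cf cs ((i : Int) + 1) then cf.getD (i + 1) 0 else 0)
  + (if i < cs.length ∧ cs.getD i ' ' = '.' ∧ cf.getD i 0 ≠ 0 then cf.getD i 0 else 0)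

def irradiate_alt (current_frame : List Int) (counter : Int) (env : String) : List Int × Int :=
  let cs := env.toList
  let n := current_frame.length
  ((List.range n).map (pvPull current_frame cs),
   counter + ((List.range n).filter (fun j : Nat => pvPeak current_frame cs (j : Int))).length)

-- ===== PRECONDITION & SPEC =====
-- Pre_ excludes len(env) > len(current_frame): there A raises IndexError at current_frame[index].
def Pre_irradiate (current_frame : List Int) (counter : Int) (env : String) : Prop :=
  env.toList.length ≤ current_frame.length
instance (current_frame : List Int) (counter : Int) (env : String) : Decidable (Pre_irradiate current_frame counter env) := by unfold Pre_irradiate; infer_instance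

def pvWitness_irradiate : List Int × Int × String := ([1, 0, 2], 0, "^.^")

def Spec_irradiate (current_frame : List Int) (counter : Int) (env : String) (out : List Int × Int) : Prop := out = irradiate_alt current_frame counter env
instance (current_frame : List Int) (counter : Int) (env : String) (out : List Int × Int) : Decidable (Spec_irradiate current_frame counter env out) := by unfold Spec_irradiate; infer_instance

-- ===== CLAIM (what is proved, stated in full; the proofs are below) =====
def Claim_equal_irradiate : Prop := ∀ (current_frame : List Int) (counter : Int) (env : String), Dom_irradiate current_frame counter env → Pre_irradiate current_frame counter env → Spec_irradiate current_frame counter env (irradiate current_frame counter env)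

-- ===== LEMMAS AND PROOFS =====

theorem pv_bump_length (xs : List Int) (j v : Int) : (pvBump xs j v).length = xs.length := by
  simp [pvBump]

theorem pv_bump_getD (xs : List Int) (j v : Int) (i : Nat)
    (h0 : 0 ≤ j) (h1 : j < (xs.length : Int)) :
    (pvBump xs j v).getD i 0 = xs.getD i 0 + (if (i : Int) = j then v else 0) := by
  by_cases hij : (i : Int) = j
  · have hi : i = j.toNat := by omega
    have hlt : j.toNat < xs.length := by omega
    subst hi
    simp [pvBump, hij, List.getD_eq_getElem?_getD, hlt]
  · have hi : i ≠ j.toNat := by omega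
    simp [pvBump, hij, List.getD_eq_getElem?_getD, Ne.symm hi]

-- getD/length view of A's guarded `if is_valid then result[j] += v`
theorem pv_bump_if_length (P : Prop) [Decidable P] (r : List Int) (j v : Int) :
    (if P then pvBump r j v else r).length = r.length := by
  split_ifs <;> simp [pv_bump_length]

theorem pv_bump_if_getD (P : Prop) [Decidable P] (r : List Int) (j v : Int) (i : Nat)
    (h : P → 0 ≤ j ∧ j < (r.length : Int)) :
    (if P then pvBump r j v else r).getD i 0
      = r.getD i 0 + (if P ∧ (i : Int) = j then v else 0) := by
  by_cases hp : P
  · simp only [if_pos hp]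
    rw [pv_bump_getD r j v i (h hp).1 (h hp).2]
    simp [hp]
  · simp [hp]

theorem pv_list_ext (xs ys : List Int) (h : xs.length = ys.length)
    (hh : ∀ i, i < xs.length → xs.getD i 0 = ys.getD i 0) : xs = ys := by
  apply List.ext_getElem h
  intro i h1 h2
  have := hh i h1
  simpa [List.getD_eq_getElem, h1, h2] using this

theorem pv_filter_step (p q : Nat → Bool) (d : Nat) (hpd : p d = false)
    (hag : ∀ j, j ≠ d → p j = q j) :
    ∀ n, d < n → ((List.range n).filter q).length
      = ((List.range n).filter p).length + (if q d then 1 else 0) := by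
  intro n
  induction n with
  | zero => intro h; omega
  | succ n ih =>
    intro hdn
    rw [List.range_succ, List.filter_append, List.filter_append,
        List.length_append, List.length_append]
    by_cases hnd : n = d
    · subst hnd
      have hpq : (List.range n).filter p = (List.range n).filter q := by
        apply List.filter_congr
        intro j hj
        exact hag j (by simp at hj; omega)
      rw [hpq]
      cases hq : q n <;> simp [hpd, hq]
    · have h2 : List.filter q [n] = List.filter p [n] := by
        simp [List.filter_singleton, hag n hnd]
      rw [ih (by omega), h2]
      ring

theorem pv_peak_d_false (cf : List Int) (ds : List Char) :
    pvPeak cf ds (ds.length : Int) = false := by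
  unfold pvPeak
  rw [decide_eq_false_iff_not]
  rintro ⟨h1, h2, _⟩
  omega

theorem pv_peak_ne (cf : List Int) (ds : List Char) (c : Char) (j : Int)
    (hj : j ≠ (ds.length : Int)) :
    pvPeak cf (ds ++ [c]) j = pvPeak cf ds j := by
  unfold pvPeak
  rw [decide_eq_decide]
  by_cases h0 : 0 ≤ j ∧ j < (ds.length : Int)
  · have hlt : j.toNat < ds.length := by omega
    rw [List.getD_append ds [c] ' ' j.toNat hlt]
    simp only [List.length_append, List.length_cons, List.length_nil]
    constructor <;> rintro ⟨h1, h2, h3, h4, h5⟩ <;> exact ⟨h1, by push_cast; omega, h3, h4, h5⟩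
  · rw [not_and_or, not_le, not_lt] at h0
    constructor
    · rintro ⟨h1, h2, h3, h4, h5⟩
      exfalso
      simp only [List.length_append, List.length_cons, List.length_nil] at h2
      push_cast at h2
      omega
    · rintro ⟨h1, h2, h3, h4, h5⟩
      exfalso
      omega

theorem pv_peak_self (cf : List Int) (ds : List Char) (c : Char)
    (hd : ds.length < cf.length) :
    pvPeak cf (ds ++ [c]) (ds.length : Int)
      = decide (c = '^' ∧ cf.getD ds.length 0 ≠ 0) := by
  unfold pvPeak
  rw [decide_eq_decide]
  have ht : ((ds.length : Int)).toNat = ds.length := by omega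
  have hg : (ds ++ [c]).getD ds.length ' ' = c := by simp
  simp only [List.length_append, List.length_cons, List.length_nil, ht, hg]
  constructor
  · rintro ⟨_, _, _, h4, h5⟩; exact ⟨h4, h5⟩
  · rintro ⟨h4, h5⟩; exact ⟨by omega, by push_cast; omega, by omega, h4, h5⟩

theorem pv_pull_nil (cf : List Int) (i : Nat) : pvPull cf [] i = 0 := by
  simp [pvPull, pvPeak]

theorem pv_peak_nil (cf : List Int) (j : Int) : pvPeak cf [] j = false := by
  unfold pvPeak
  rw [decide_eq_false_iff_not]
  rintro ⟨h1, h2, _⟩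
  simp at h2
  omega

theorem pv_pull_append (cf : List Int) (ds : List Char) (c : Char)
    (hd : ds.length < cf.length) (i : Nat) :
    pvPull cf (ds ++ [c]) i = pvPull cf ds i
      + (if (i : Int) = (ds.length : Int) + 1 ∧ c = '^' ∧ cf.getD ds.length 0 ≠ 0 then cf.getD ds.length 0 else 0)
      + (if (i : Int) = (ds.length : Int) - 1 ∧ c = '^' ∧ cf.getD ds.length 0 ≠ 0 then cf.getD ds.length 0 else 0)
      + (if i = ds.length ∧ c = '.' ∧ cf.getD i 0 ≠ 0 then cf.getD i 0 else 0) := by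
  have T1 : (if pvPeak cf (ds ++ [c]) ((i : Int) - 1) then cf.getD (i - 1) 0 else 0)
      = (if pvPeak cf ds ((i : Int) - 1) then cf.getD (i - 1) 0 else 0)
        + (if (i : Int) = (ds.length : Int) + 1 ∧ c = '^' ∧ cf.getD ds.length 0 ≠ 0 then cf.getD ds.length 0 else 0) := by
    by_cases h1 : (i : Int) - 1 = (ds.length : Int)
    · have hid : (i : Int) = (ds.length : Int) + 1 := by omega
      have hgd : i - 1 = ds.length := by omega
      rw [h1, pv_peak_self cf ds c hd, pv_peak_d_false, hgd]
      by_cases hc : c = '^' ∧ cf.getD ds.length 0 ≠ 0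
      · simp [hc, hid]
      · rw [if_neg (show ¬(decide (c = '^' ∧ cf.getD ds.length 0 ≠ 0) = true) by
            simp only [decide_eq_true_eq]; exact hc)]
        rw [if_neg (show ¬((i : Int) = (ds.length : Int) + 1 ∧ c = '^' ∧ cf.getD ds.length 0 ≠ 0) from
          fun hh => hc ⟨hh.2.1, hh.2.2⟩)]
        simp
    · rw [pv_peak_ne cf ds c _ h1]
      rw [if_neg (by rintro ⟨ha, _⟩; omega :
        ¬((i : Int) = (ds.length : Int) + 1 ∧ c = '^' ∧ cf.getD ds.length 0 ≠ 0))]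
      simp
  have T2 : (if pvPeak cf (ds ++ [c]) ((i : Int) + 1) then cf.getD (i + 1) 0 else 0)
      = (if pvPeak cf ds ((i : Int) + 1) then cf.getD (i + 1) 0 else 0)
        + (if (i : Int) = (ds.length : Int) - 1 ∧ c = '^' ∧ cf.getD ds.length 0 ≠ 0 then cf.getD ds.length 0 else 0) := by
    by_cases h1 : (i : Int) + 1 = (ds.length : Int)
    · have hid : (i : Int) = (ds.length : Int) - 1 := by omega
      have hgd : i + 1 = ds.length := by omega
      rw [h1, pv_peak_self cf ds c hd, pv_peak_d_false, hgd]
      by_cases hc : c = '^' ∧ cf.getD ds.length 0 ≠ 0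
      · simp [hc, hid]
      · rw [if_neg (show ¬(decide (c = '^' ∧ cf.getD ds.length 0 ≠ 0) = true) by
            simp only [decide_eq_true_eq]; exact hc)]
        rw [if_neg (show ¬((i : Int) = (ds.length : Int) - 1 ∧ c = '^' ∧ cf.getD ds.length 0 ≠ 0) from
          fun hh => hc ⟨hh.2.1, hh.2.2⟩)]
        simp
    · rw [pv_peak_ne cf ds c _ h1]
      rw [if_neg (by rintro ⟨ha, _⟩; omega :
        ¬((i : Int) = (ds.length : Int) - 1 ∧ c = '^' ∧ cf.getD ds.length 0 ≠ 0))]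
      simp
  have T3 : (if i < (ds ++ [c]).length ∧ (ds ++ [c]).getD i ' ' = '.' ∧ cf.getD i 0 ≠ 0 then cf.getD i 0 else 0)
      = (if i < ds.length ∧ ds.getD i ' ' = '.' ∧ cf.getD i 0 ≠ 0 then cf.getD i 0 else 0)
        + (if i = ds.length ∧ c = '.' ∧ cf.getD i 0 ≠ 0 then cf.getD i 0 else 0) := by
    by_cases h1 : i = ds.length
    · subst h1
      have hg : (ds ++ [c]).getD ds.length ' ' = c := by simp
      simp only [List.length_append, List.length_cons, List.length_nil, hg]
      rw [if_neg (by omega : ¬(ds.length < ds.length ∧ ds.getD ds.length ' ' = '.' ∧ cf.getD ds.length 0 ≠ 0))]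
      by_cases hc : c = '.' ∧ cf.getD ds.length 0 ≠ 0
      · rw [if_pos (show ds.length < ds.length + 1 ∧ c = '.' ∧ cf.getD ds.length 0 ≠ 0 from ⟨by omega, hc.1, hc.2⟩)]
        rw [if_pos (show True ∧ c = '.' ∧ cf.getD ds.length 0 ≠ 0 from ⟨trivial, hc⟩)]
        simp
      · rw [if_neg (show ¬(ds.length < ds.length + 1 ∧ c = '.' ∧ cf.getD ds.length 0 ≠ 0) from
          fun hh => hc ⟨hh.2.1, hh.2.2⟩)]
        rw [if_neg (show ¬(True ∧ c = '.' ∧ cf.getD ds.length 0 ≠ 0) from fun hh => hc hh.2)]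
        simp
    · rw [if_neg (show ¬(i = ds.length ∧ c = '.' ∧ cf.getD i 0 ≠ 0) from fun hh => h1 hh.1)]
      by_cases h2 : i < ds.length
      · rw [List.getD_append ds [c] ' ' i h2]
        simp only [List.length_append, List.length_cons, List.length_nil]
        have : (i < ds.length + 1) ↔ (i < ds.length) := by omega
        simp [this]
      · rw [if_neg (by simp only [List.length_append, List.length_cons, List.length_nil]; omega :
          ¬(i < (ds ++ [c]).length ∧ (ds ++ [c]).getD i ' ' = '.' ∧ cf.getD i 0 ≠ 0))]
        rw [if_neg (by omega : ¬(i < ds.length ∧ ds.getD i ' ' = '.' ∧ cf.getD i 0 ≠ 0))]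
        simp
  unfold pvPull
  rw [T1, T2, T3]
  ring

theorem pv_cnt_step (cf : List Int) (ds : List Char) (c : Char)
    (hd : ds.length < cf.length) :
    ((List.range cf.length).filter (fun j : Nat => pvPeak cf (ds ++ [c]) (j : Int))).length
      = ((List.range cf.length).filter (fun j : Nat => pvPeak cf ds (j : Int))).length
        + (if pvPeak cf (ds ++ [c]) ((ds.length : Int)) then 1 else 0) := by
  exact pv_filter_step (fun j : Nat => pvPeak cf ds (j : Int)) (fun j : Nat => pvPeak cf (ds ++ [c]) (j : Int))
    ds.length (pv_peak_d_false cf ds)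
    (fun j hj => (pv_peak_ne cf ds c (j : Int) (by exact_mod_cast hj)).symm)
    cf.length hd

theorem pv_rays (cf : List Int) (d : Nat) (hd : d < cf.length) :
    (PySem.List.pyGet? cf (d : Int)).getD 0 = cf.getD d 0 := by
  simp [PySem.List.pyGet?_natCast, List.getD_eq_getElem?_getD, List.getElem?_eq_getElem hd]

theorem pv_step (cf : List Int) (C : Int) (ds : List Char) (c : Char)
    (hd : ds.length < cf.length) :
    pvStepA cf ((List.range cf.length).map (pvPull cf ds), C) ((ds.length : Int), c)
      = ((List.range cf.length).map (pvPull cf (ds ++ [c])),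
         C + (if pvPeak cf (ds ++ [c]) ((ds.length : Int)) then 1 else 0)) := by
  have hbase : ∀ i, i < cf.length →
      ((List.range cf.length).map (pvPull cf ds)).getD i 0 = pvPull cf ds i :=
    fun i hi => PySem.List.getD_map_range _ _ _ _ hi
  have hblen : ((List.range cf.length).map (pvPull cf ds)).length = cf.length := by simp
  unfold pvStepA
  simp only []
  rw [pv_rays cf ds.length hd]
  by_cases hv0 : cf.getD ds.length 0 = 0
  · rw [if_neg (by simpa using hv0)]
    have hpk : pvPeak cf (ds ++ [c]) ((ds.length : Int)) = false := by
      rw [pv_peak_self cf ds c hd, decide_eq_false_iff_not]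
      rintro ⟨_, hne⟩
      exact hne hv0
    rw [hpk]
    have hmap : (List.range cf.length).map (pvPull cf ds)
        = (List.range cf.length).map (pvPull cf (ds ++ [c])) := by
      apply List.map_congr_left
      intro i _
      rw [pv_pull_append cf ds c hd i]
      rw [if_neg (show ¬((i : Int) = (ds.length : Int) + 1 ∧ c = '^' ∧ cf.getD ds.length 0 ≠ 0) from
        fun hh => hh.2.2 hv0)]
      rw [if_neg (show ¬((i : Int) = (ds.length : Int) - 1 ∧ c = '^' ∧ cf.getD ds.length 0 ≠ 0) from
        fun hh => hh.2.2 hv0)]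
      rw [if_neg (show ¬(i = ds.length ∧ c = '.' ∧ cf.getD i 0 ≠ 0) from
        fun hh => hh.2.2 (hh.1 ▸ hv0))]
      ring
    rw [hmap]
    simp
  · rw [if_pos (by simpa using hv0)]
    by_cases hc : c = '^'
    · subst hc
      have hpk : pvPeak cf (ds ++ ['^']) ((ds.length : Int)) = true := by
        rw [pv_peak_self cf ds '^' hd, decide_eq_true_eq]
        exact ⟨rfl, hv0⟩
      rw [hpk, if_pos rfl, if_neg (by decide : ¬('^' : Char) = '.')]
      simp only [if_pos trivial]
      refine Prod.ext ?_ rfl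
      apply pv_list_ext
      · rw [pv_bump_if_length, pv_bump_if_length, hblen]
        simp
      · intro i hi
        have hi2 : i < cf.length := by
          rwa [pv_bump_if_length, pv_bump_if_length, hblen] at hi
        rw [pv_bump_if_getD _ _ _ _ _ (by
          intro hP
          rw [pv_bump_if_length, hblen]
          exact ⟨hP.1, hP.2⟩)]
        rw [pv_bump_if_getD _ _ _ _ _ (by
          intro hP
          rw [hblen]
          exact ⟨hP.1, hP.2⟩)]
        rw [hbase i hi2, PySem.List.getD_map_range _ _ _ _ hi2,
            pv_pull_append cf ds '^' hd i]
        rw [if_neg (by simp : ¬(i = ds.length ∧ ('^' : Char) = '.' ∧ cf.getD i 0 ≠ 0))]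
        have hn : ((ds.length : Int)) < (cf.length : Int) := by exact_mod_cast hd
        simp only [ne_eq, hv0, not_false_eq_true, and_true]
        split_ifs <;> omega
    · have hpk : pvPeak cf (ds ++ [c]) ((ds.length : Int)) = false := by
        rw [pv_peak_self cf ds c hd]
        simp [hc]
      rw [hpk, if_neg hc]
      by_cases hc2 : c = '.'
      · subst hc2
        rw [if_pos rfl]
        refine Prod.ext ?_ (by simp)
        apply pv_list_ext
        · rw [pv_bump_length, hblen]; simp
        · intro i hi
          have hi2 : i < cf.length := by rwa [pv_bump_length, hblen] at hi
          rw [pv_bump_getD _ _ _ _ (by omega) (by rw [hblen]; exact_mod_cast hd)]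
          rw [hbase i hi2, PySem.List.getD_map_range _ _ _ _ hi2,
              pv_pull_append cf ds '.' hd i]
          rw [if_neg (by simp : ¬((i : Int) = (ds.length : Int) + 1 ∧ ('.' : Char) = '^' ∧ cf.getD ds.length 0 ≠ 0))]
          rw [if_neg (by simp : ¬((i : Int) = (ds.length : Int) - 1 ∧ ('.' : Char) = '^' ∧ cf.getD ds.length 0 ≠ 0))]
          by_cases him : i = ds.length
          · subst him
            rw [if_pos (show ((ds.length : Int)) = ((ds.length : Int)) from rfl)]
            rw [if_pos (show ds.length = ds.length ∧ ('.' : Char) = '.' ∧ cf.getD ds.length 0 ≠ 0 from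
              ⟨rfl, rfl, hv0⟩)]
            ring
          · rw [if_neg (show ¬((i : Int) = ((ds.length : Int))) from by omega)]
            rw [if_neg (show ¬(i = ds.length ∧ ('.' : Char) = '.' ∧ cf.getD i 0 ≠ 0) from
              fun hh => him hh.1)]
            ring
      · rw [if_neg hc2]
        have hmap : (List.range cf.length).map (pvPull cf ds)
            = (List.range cf.length).map (pvPull cf (ds ++ [c])) := by
          apply List.map_congr_left
          intro i _
          rw [pv_pull_append cf ds c hd i]
          simp [hc, hc2]
        rw [hmap]
        simp

theorem pv_main (cf : List Int) (counter : Int) (cs : List Char)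
    (h : cs.length ≤ cf.length) :
    (PySem.List.enumerate cs 0).foldl (pvStepA cf) (cf.map (fun _ => 0), counter)
      = ((List.range cf.length).map (pvPull cf cs),
         counter + ((List.range cf.length).filter (fun j : Nat => pvPeak cf cs (j : Int))).length) := by
  induction cs using List.reverseRecOn with
  | nil =>
    rw [PySem.List.enumerate_nil, List.foldl_nil]
    have hmap : (List.range cf.length).map (pvPull cf []) = cf.map (fun _ => (0 : Int)) := by
      rw [List.map_congr_left (fun i _ => pv_pull_nil cf i), List.map_const', List.map_const',
        List.length_range]
    have hfil : (List.range cf.length).filter (fun j : Nat => pvPeak cf [] (j : Int)) = [] := by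
      apply List.filter_eq_nil_iff.mpr
      intro j _
      simp [pv_peak_nil]
    rw [hmap, hfil]
    simp
  | append_singleton ds c ih =>
    have hd : ds.length < cf.length := by
      simp only [List.length_append, List.length_cons, List.length_nil] at h; omega
    have ih' := ih (by omega)
    have henum : PySem.List.enumerate (ds ++ [c]) 0
        = PySem.List.enumerate ds 0 ++ [((ds.length : Int), c)] := by
      simp [PySem.List.enumerate_append, PySem.List.enumerate_cons, PySem.List.enumerate_nil]
    rw [henum, List.foldl_append, ih', List.foldl_cons, List.foldl_nil,
        pv_step cf _ ds c hd, pv_cnt_step cf ds c hd]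
    refine Prod.ext rfl ?_
    push_cast
    ring

-- ===== VERDICT (by name: the statement is the Claim_ definition above) =====
theorem irradiate_spec : Claim_equal_irradiate := by
  intro cf counter env _ hpre
  unfold Spec_irradiate irradiate irradiate_alt
  exact pv_main cf counter env.toList hpre
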